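-- pv_equiv track=rewrite | github.com/XingxinHE/PythonCrashCourse_PracticeFile | Chapter 8 Function/8-11.py | make_great
-- ===== SOURCE A (Python) =====
-- def make_great(magicians):
--     """add 'the great' in the element"""
--
-- #    add a temporary list
--     great_magicians = []
--
-- #    this is too hard-coded
-- #    magicians_copy = magicians[:]
--
--
-- #    ATTENTION!! to modify each element in the list, use WHILE!!!
--     while magicians:
--         great_magician = "the Great "+magicians.pop()
--         great_magicians.append(great_magician)
--     for great_magician in great_magicians:
--         magicians.append(great_magician)
--
-- #    add the return value
--     return magicians
-- ===== SOURCE B (Python) =====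
-- def make_great(magicians):
--     """add 'the great' in the element"""
--     for i in range(len(magicians)):
--         magicians[i] = "the Great " + magicians[i]
--     magicians.reverse()
--     return magicians
-- ===== Notes on version B (the rewrite author's own statement) =====
-- stated objective: simpler
-- what changed: B prefixes each element in place by index and then reverses once, instead of emptying the list by popping into a temporary list and re-appending; the same list object is mutated and returned.
import Mathlib
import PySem

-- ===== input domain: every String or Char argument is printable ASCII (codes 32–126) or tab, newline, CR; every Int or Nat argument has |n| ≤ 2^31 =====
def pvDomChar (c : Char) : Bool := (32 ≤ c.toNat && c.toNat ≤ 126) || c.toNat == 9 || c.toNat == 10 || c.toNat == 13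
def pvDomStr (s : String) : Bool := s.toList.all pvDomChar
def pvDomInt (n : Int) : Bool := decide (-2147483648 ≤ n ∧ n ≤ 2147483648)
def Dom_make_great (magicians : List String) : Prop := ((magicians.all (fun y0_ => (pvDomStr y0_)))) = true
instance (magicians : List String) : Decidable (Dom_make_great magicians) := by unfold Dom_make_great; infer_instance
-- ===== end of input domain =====

-- B prefixes each element in place by index then reverses once, instead of A's pop-into-temp-and-refill;
-- both mutate the passed list in Python; the equivalence proved here is about the returned value.

-- ===== PORT A =====
-- the while loop: pop the last element, prefix it, append to great_magicians
def make_great_loop (magicians great_magicians : List String) : List String :=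
  if h : magicians = [] then great_magicians
  else
    make_great_loop magicians.dropLast (great_magicians ++ ["the Great " ++ magicians.getLast h])
termination_by magicians.length
decreasing_by
  simp only [List.length_dropLast]
  cases magicians with
  | nil => exact absurd rfl h
  | cons a as => simp

def make_great (magicians : List String) : List String :=
  -- great_magicians = []; while magicians: …; then magicians (now empty) refilled by appending
  -- each great_magician, so the returned value is great_magicians in order
  make_great_loop magicians []

-- ===== PORT B =====
def make_great_alt (magicians : List String) : List String :=
  -- for i in range(len(magicians)): magicians[i] = "the Great " + magicians[i]  → map in place
  (magicians.map (fun m => "the Great " ++ m)).reverse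

-- ===== PRECONDITION & SPEC =====
def Spec_make_great (magicians : List String) (out : List String) : Prop := out = make_great_alt magicians
instance (magicians : List String) (out : List String) : Decidable (Spec_make_great magicians out) := by unfold Spec_make_great; infer_instance

-- ===== CLAIM (what is proved, stated in full; the proofs are below) =====
def Claim_equal_make_great : Prop := ∀ (magicians : List String), Dom_make_great magicians → Spec_make_great magicians (make_great magicians)

-- ===== LEMMAS AND PROOFS =====
theorem make_great_loop_eq (magicians : List String) :
    ∀ acc, make_great_loop magicians acc =
      acc ++ (magicians.map (fun m => "the Great " ++ m)).reverse := by
  induction magicians using List.reverseRecOn with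
  | nil => intro acc; simp [make_great_loop]
  | append_singleton ms a ih =>
    intro acc
    rw [make_great_loop, dif_neg (by simp : ¬ (ms ++ [a] = []))]
    rw [List.dropLast_concat, ih]
    simp

-- ===== VERDICT (by name: the statement is the Claim_ definition above) =====
theorem make_great_spec : Claim_equal_make_great := by
  intro magicians _
  unfold Spec_make_great make_great
  rw [make_great_loop_eq]
  rfl
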